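-- pv_equiv track=rewrite | github.com/jimmaciejewski/firmwarefinder | firmware/models.py | upload_path_name
-- ===== SOURCE A (Python) =====
-- def upload_path_name(name):
--     replacement_list = ['/', ' ', ':', '&', '(', ')']
--     for item in replacement_list:
--         name = name.replace(item, '-')
--     # Remove trailing -
--     if name[-1] == '-':
--         name = name[:-1]
--     # Remove double --
--     name.replace('--', '-')
--     # Just in case :)
--     name.replace('--', '-')
--     return name
-- ===== SOURCE B (Python) =====
-- def upload_path_name(name):
--     specials = {'/', ' ', ':', '&', '(', ')'}
--     s = ''.join('-' if c in specials else c for c in name)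
--     if s.endswith('-'):
--         s = s[:-1]
--     return s
-- ===== Notes on version B (the rewrite author's own statement) =====
-- stated objective: simpler
-- what changed: Replaces A's six sequential whole-string replace() passes (plus two dead '--' replaces whose results A discards) with a single per-character pass over a set of special characters, keeping the removal of one trailing dash.
import Mathlib
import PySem

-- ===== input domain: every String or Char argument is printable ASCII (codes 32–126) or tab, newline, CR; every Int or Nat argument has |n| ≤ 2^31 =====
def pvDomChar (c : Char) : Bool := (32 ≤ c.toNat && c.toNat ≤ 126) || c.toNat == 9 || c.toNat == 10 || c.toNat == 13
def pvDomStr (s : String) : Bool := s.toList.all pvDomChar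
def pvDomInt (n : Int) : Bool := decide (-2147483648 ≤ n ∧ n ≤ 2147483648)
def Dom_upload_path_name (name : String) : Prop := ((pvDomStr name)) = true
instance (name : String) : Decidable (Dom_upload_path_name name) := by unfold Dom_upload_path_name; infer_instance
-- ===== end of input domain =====

-- B replaces A's six sequential whole-string replace() passes with one per-character
-- pass over a set of special characters (objective: simpler).

-- ===== PORT A =====
def upload_path_name (name : String) : String :=
  let replacement_list : List String := ["/", " ", ":", "&", "(", ")"]
  let name := replacement_list.foldl (fun n item => PySem.Str.replace n item "-") name
  -- Remove trailing -  (Python raises IndexError on "" here; Pre_ excludes "")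
  let name := if PySem.Str.pyGet? name (-1) = some '-' then PySem.Str.slice name none (some (-1)) else name
  -- Remove double --  (results discarded, as in A)
  let _ := PySem.Str.replace name "--" "-"
  -- Just in case :)
  let _ := PySem.Str.replace name "--" "-"
  name

-- ===== PORT B =====
def upload_path_name_alt (name : String) : String :=
  let specials : PySem.Set Char := PySem.Set.ofList ['/', ' ', ':', '&', '(', ')']
  let s := String.ofList (name.toList.map (fun c => if PySem.Set.contains specials c then '-' else c))
  if PySem.Str.endswith s "-" then PySem.Str.slice s none (some (-1)) else s

-- ===== PRECONDITION & SPEC =====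
-- Pre_ excludes only the empty string, on which A's name[-1] raises IndexError.
def Pre_upload_path_name (name : String) : Prop := name ≠ ""
instance (name : String) : Decidable (Pre_upload_path_name name) := by unfold Pre_upload_path_name; infer_instance
def pvWitness_upload_path_name : String := "a b/c"

def Spec_upload_path_name (name : String) (out : String) : Prop := out = upload_path_name_alt name
instance (name : String) (out : String) : Decidable (Spec_upload_path_name name out) := by unfold Spec_upload_path_name; infer_instance

-- ===== CLAIM (what is proved, stated in full; the proofs are below) =====
def Claim_equal_upload_path_name : Prop := ∀ (name : String), Dom_upload_path_name name → Pre_upload_path_name name → Spec_upload_path_name name (upload_path_name name)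

-- ===== LEMMAS AND PROOFS =====

-- replacing a single character by a single character is a map
lemma replace_go_single (c d : Char) :
    ∀ (fuel : Nat) (l acc : List Char), l.length ≤ fuel →
      PySem.Chars.replace.go [c] [d] fuel l acc
        = acc.reverse ++ l.map (fun x => if x = c then d else x) := by
  intro fuel
  induction fuel with
  | zero =>
    intro l acc h
    have : l = [] := List.length_eq_zero_iff.mp (Nat.le_zero.mp h)
    subst this
    simp [PySem.Chars.replace.go]
  | succ n ih =>
    intro l acc h
    cases l with
    | nil => simp [PySem.Chars.replace.go]
    | cons x t =>
      by_cases hx : x = c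
      · subst hx
        have hp : List.isPrefixOf [x] (x :: t) = true := by simp [List.isPrefixOf]
        simp only [PySem.Chars.replace.go, hp, if_true, List.length_cons, List.length_nil,
          List.drop_succ_cons, List.drop_zero]
        rw [ih _ _ (by simpa using h)]
        simp
      · have hp : List.isPrefixOf [c] (x :: t) = false := by
          simp [List.isPrefixOf]
          intro hcx; exact hx hcx.symm
        simp only [PySem.Chars.replace.go, hp]
        have ht : t.length ≤ n := by simpa using h
        rw [ih _ _ ht]
        simp [hx]

lemma chars_replace_single (cs : List Char) (c d : Char) :
    PySem.Chars.replace cs [c] [d] = cs.map (fun x => if x = c then d else x) := by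
  have h : ([c] : List Char).isEmpty = false := rfl
  simp only [PySem.Chars.replace, h, Bool.false_eq_true, if_false]
  simpa using replace_go_single c d cs.length cs [] (Nat.le_refl _)

-- the character map B uses
def pvF (c : Char) : Char :=
  if c = '/' ∨ c = ' ' ∨ c = ':' ∨ c = '&' ∨ c = '(' ∨ c = ')' then '-' else c

-- A's fold of six single-char replaces computes a single map, on toList
lemma foldl_replace_toList (name : String) :
    (List.foldl (fun n item => PySem.Str.replace n item "-") name
        ["/", " ", ":", "&", "(", ")"]).toList = name.toList.map pvF := by
  simp only [List.foldl_cons, List.foldl_nil]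
  have h : ∀ (s : String) (c : Char),
      (PySem.Str.replace s (String.ofList [c]) "-").toList
        = s.toList.map (fun x => if x = c then '-' else x) := by
    intro s c
    rw [PySem.Str.toList_replace, String.toList_ofList,
      show ("-" : String).toList = ['-'] from rfl]
    exact chars_replace_single s.toList c '-'
  rw [show ("/" : String) = String.ofList ['/'] by rfl,
      show (" " : String) = String.ofList [' '] by rfl,
      show (":" : String) = String.ofList [':'] by rfl,
      show ("&" : String) = String.ofList ['&'] by rfl,
      show ("(" : String) = String.ofList ['('] by rfl,
      show (")" : String) = String.ofList [')'] by rfl,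
      h, h, h, h, h, h]
  simp only [List.map_map]
  apply List.map_congr_left
  intro x _
  simp only [Function.comp]
  unfold pvF
  by_cases h1 : x = '/' <;> by_cases h2 : x = ' ' <;> by_cases h3 : x = ':' <;>
    by_cases h4 : x = '&' <;> by_cases h5 : x = '(' <;> by_cases h6 : x = ')' <;>
    simp_all

-- B's membership test agrees with pvF
lemma pvF_eq_contains (c : Char) :
    (if PySem.Set.contains (PySem.Set.ofList ['/', ' ', ':', '&', '(', ')']) c then '-' else c) = pvF c := by
  unfold pvF
  by_cases h : c = '/' ∨ c = ' ' ∨ c = ':' ∨ c = '&' ∨ c = '(' ∨ c = ')'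
  · rcases h with h | h | h | h | h | h <;> subst h <;> rfl
  · rw [not_or, not_or, not_or, not_or, not_or] at h
    obtain ⟨h1, h2, h3, h4, h5, h6⟩ := h
    have hc : PySem.Set.contains (PySem.Set.ofList ['/', ' ', ':', '&', '(', ')']) c = false := by
      simp [PySem.Set.contains, PySem.Set.ofList, PySem.Set.add, h1, h2, h3, h4, h5, h6]
    simp

-- last-char test: pyGet? at -1 vs endswith "-", on the character list
lemma last_dash_iff (l : List Char) :
    (PySem.List.pyGet? l (-1) = some '-') ↔ PySem.Chars.endswith l ['-'] = true := by
  induction l using List.reverseRecOn with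
  | nil => simp [PySem.List.pyGet?, PySem.List.pyIdx?, PySem.Chars.endswith]
  | append_singleton l a ih =>
    simp [PySem.List.pyGet?, PySem.List.pyIdx?, PySem.Chars.endswith, List.isSuffixOf]
    exact eq_comm

-- ===== VERDICT (by name: the statement is the Claim_ definition above) =====
theorem upload_path_name_spec : Claim_equal_upload_path_name := by
  intro name _ _
  unfold Spec_upload_path_name upload_path_name upload_path_name_alt
  dsimp only
  set A1 : String :=
    List.foldl (fun n item => PySem.Str.replace n item "-") name ["/", " ", ":", "&", "(", ")"] with hA1
  set B1 : String :=
    String.ofList (name.toList.map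
      (fun c => if PySem.Set.contains (PySem.Set.ofList ['/', ' ', ':', '&', '(', ')']) c then '-' else c)) with hB1
  have hAB : A1 = B1 := by
    apply String.toList_inj.mp
    rw [hA1, hB1, foldl_replace_toList, String.toList_ofList]
    exact (List.map_congr_left fun c _ => (pvF_eq_contains c).symm)
  rw [hAB]
  have hcond : (PySem.Str.pyGet? B1 (-1) = some '-') ↔ PySem.Str.endswith B1 "-" = true := by
    have h := last_dash_iff B1.toList
    simpa [PySem.Str.pyGet?, PySem.Str.endswith,
      show ("-" : String).toList = ['-'] from rfl] using h
  by_cases hc : PySem.Str.pyGet? B1 (-1) = some '-'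
  · rw [if_pos hc, if_pos (hcond.mp hc)]
  · rw [if_neg hc, if_neg (fun h => hc (hcond.mpr h))]
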